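-- pv_equiv track=rewrite | github.com/Steeverson/Bachelorarbeit_Uni_Leipzig | Rules/filter_rules.py | rule_complete
-- ===== SOURCE A (Python) =====
-- from typing import Iterable, Iterator, List, Optional, Set, Tuple
--
-- def rule_complete(chunks: List[str]) -> bool:
--     text = "".join(chunks)
--     depth = 0
--     in_q = False
--     esc = False
--     saw_open = False
--     for ch in text:
--         if esc:
--             esc = False
--             continue
--         if ch == "\\":
--             esc = True
--             continue
--         if ch == '"':
--             in_q = not in_q
--             continue
--         if in_q:
--             continue
--         if ch == "(":
--             depth += 1
--             saw_open = True
--         elif ch == ")":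
--             depth = max(0, depth - 1)
--     return saw_open and depth == 0
-- ===== SOURCE B (Python) =====
-- from typing import List
--
-- def _clean(text: str) -> List[str]:
--     # strip escaped pairs and quoted regions; keep everything else
--     out = []
--     i = 0
--     n = len(text)
--     while i < n:
--         ch = text[i]
--         if ch == "\\":
--             i += 2  # drop the backslash and the escaped char
--         elif ch == '"':
--             i += 1
--             while i < n and text[i] != '"':
--                 i += 2 if text[i] == "\\" else 1
--             i += 1  # past the closing quote (or end)
--         else:
--             out.append(ch)
--             i += 1
--     return out
--
-- def rule_complete(chunks: List[str]) -> bool: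
--     cleaned = _clean("".join(chunks))
--     depth = 0
--     for ch in cleaned:
--         if ch == "(":
--             depth += 1
--         elif ch == ")":
--             depth = max(0, depth - 1)
--     return "(" in cleaned and depth == 0
-- ===== Notes on version B (the rewrite author's own statement) =====
-- stated objective: simpler
-- what changed: Replaces A's single interleaved four-flag state machine by a two-pass decomposition: one pass strips escaped pairs and quoted regions (handling quotes by an inner skip loop instead of flags), a second plain pass counts clamped paren depth and checks for '(' by membership.
import Mathlib
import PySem

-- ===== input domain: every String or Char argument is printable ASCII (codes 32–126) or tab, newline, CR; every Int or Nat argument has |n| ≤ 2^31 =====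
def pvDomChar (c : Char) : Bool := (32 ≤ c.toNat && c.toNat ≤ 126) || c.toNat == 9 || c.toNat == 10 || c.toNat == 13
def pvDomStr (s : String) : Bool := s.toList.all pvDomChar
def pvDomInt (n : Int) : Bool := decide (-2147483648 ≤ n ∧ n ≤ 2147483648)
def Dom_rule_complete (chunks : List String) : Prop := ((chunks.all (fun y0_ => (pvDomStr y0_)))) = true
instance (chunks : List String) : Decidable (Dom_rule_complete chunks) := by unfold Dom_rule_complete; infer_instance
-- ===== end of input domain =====

-- B strips escapes/quotes first and then counts; A runs one interleaved state machine (objective: simpler decomposition).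

-- ===== PORT A =====
-- A's loop body, one step per character; state = (depth, in_q, esc, saw_open)
def ruleStepA (st : Int × Bool × Bool × Bool) (ch : Char) : Int × Bool × Bool × Bool :=
  let (depth, in_q, esc, saw_open) := st
  if esc then (depth, in_q, false, saw_open)
  else if ch = '\\' then (depth, in_q, true, saw_open)
  else if ch = '"' then (depth, !in_q, esc, saw_open)
  else if in_q then (depth, in_q, esc, saw_open)
  else if ch = '(' then (depth + 1, in_q, esc, true)
  else if ch = ')' then (max 0 (depth - 1), in_q, esc, saw_open)
  else (depth, in_q, esc, saw_open)

def rule_complete (chunks : List String) : Bool :=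
  let text := PySem.Str.join "" chunks
  let st := text.toList.foldl ruleStepA ((0 : Int), false, false, false)
  st.2.2.2 && decide (st.1 = 0)

-- ===== PORT B =====
-- skip to just past the closing '"' (escaped chars inside the quote are skipped in pairs)
def skipQ : List Char → List Char
  | [] => []
  | c :: rest =>
    if c = '"' then rest
    else if c = '\\' then skipQ rest.tail
    else skipQ rest
termination_by l => l.length
decreasing_by all_goals (simp; try omega)

theorem skipQ_length_le : ∀ (l : List Char), (skipQ l).length ≤ l.length
  | [] => by simp [skipQ]
  | c :: rest => by
    unfold skipQ
    split_ifs with h1 h2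
    · simp
    · have := skipQ_length_le rest.tail
      have := List.length_tail (l := rest)
      simp; omega
    · have := skipQ_length_le rest
      simp; omega
termination_by l => l.length
decreasing_by all_goals (simp; try omega)

-- first pass of B: drop escaped pairs and quoted regions, keep everything else
def cleanB : List Char → List Char
  | [] => []
  | c :: rest =>
    if c = '\\' then cleanB (rest.drop 1)
    else if c = '"' then cleanB (skipQ rest)
    else c :: cleanB rest
termination_by l => l.length
decreasing_by all_goals first
  | (simp; omega)
  | (have := skipQ_length_le rest; simp; omega)
  | simp

-- second pass of B: clamped paren depth
def depthStepB (d : Int) (ch : Char) : Int :=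
  if ch = '(' then d + 1 else if ch = ')' then max 0 (d - 1) else d

def rule_complete_alt (chunks : List String) : Bool :=
  let cleaned := cleanB (PySem.Str.join "" chunks).toList
  let depth := cleaned.foldl depthStepB (0 : Int)
  cleaned.contains '(' && decide (depth = 0)

-- ===== PRECONDITION & SPEC =====
def Spec_rule_complete (chunks : List String) (out : Bool) : Prop := out = rule_complete_alt chunks
instance (chunks : List String) (out : Bool) : Decidable (Spec_rule_complete chunks out) := by unfold Spec_rule_complete; infer_instance

-- ===== CLAIM (what is proved, stated in full; the proofs are below) =====
def Claim_equal_rule_complete : Prop := ∀ (chunks : List String), Dom_rule_complete chunks → Spec_rule_complete chunks (rule_complete chunks)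

-- ===== LEMMAS AND PROOFS =====

-- Inside a quote (in_q = true, esc = false), A's fold over cs has the same depth and
-- saw_open projections as A's fold, outside a quote, over skipQ cs.
theorem foldA_quote : ∀ (cs : List Char) (d : Int) (s : Bool),
    ((cs.foldl ruleStepA (d, true, false, s)).1 = (((skipQ cs).foldl ruleStepA (d, false, false, s)).1) ∧
     (cs.foldl ruleStepA (d, true, false, s)).2.2.2 = (((skipQ cs).foldl ruleStepA (d, false, false, s)).2.2.2))
  | [], d, s => by simp [skipQ]
  | c :: rest, d, s => by
    by_cases hq : c = '"'
    · subst hq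
      simp [skipQ, List.foldl, ruleStepA]
    · by_cases hb : c = '\\'
      · subst hb
        match rest with
        | [] => simp [skipQ, List.foldl, ruleStepA]
        | c' :: rest' =>
          have ih := foldA_quote rest' d s
          simpa [skipQ, List.foldl, ruleStepA] using ih
      · have ih := foldA_quote rest d s
        simpa [skipQ, hq, hb, List.foldl, ruleStepA] using ih
termination_by cs => cs.length
decreasing_by all_goals (simp; try omega)

-- Outside quotes with no pending escape, A's fold computes B's depth fold over cleanB cs,
-- and saw_open becomes s || (cleanB cs).contains '('.
theorem foldA_clean : ∀ (cs : List Char) (d : Int) (s : Bool),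
    ((cs.foldl ruleStepA (d, false, false, s)).1 = (cleanB cs).foldl depthStepB d ∧
     (cs.foldl ruleStepA (d, false, false, s)).2.2.2 = (s || (cleanB cs).contains '('))
  | [], d, s => by simp [cleanB]
  | c :: rest, d, s => by
    by_cases hb : c = '\\'
    · subst hb
      match rest with
      | [] => simp [cleanB, List.foldl, ruleStepA]
      | c' :: rest' =>
        have ih := foldA_clean rest' d s
        simpa [cleanB, List.foldl, ruleStepA] using ih
    · by_cases hq : c = '"'
      · subst hq
        have hskip := foldA_quote rest d s
        have ih := foldA_clean (skipQ rest) d s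
        simp only [cleanB, List.foldl, ruleStepA, if_neg (by decide : ¬ ('"' = '\\')),
          reduceIte]
        exact ⟨hskip.1.trans ih.1, hskip.2.trans ih.2⟩
      · have ih := fun d s => foldA_clean rest d s
        by_cases hp : c = '('
        · subst hp
          have := ih (d + 1) true
          simp [cleanB, List.foldl, ruleStepA, depthStepB, this.1, this.2]
        · by_cases hc : c = ')'
          · subst hc
            have := ih (max 0 (d - 1)) s
            simp [cleanB, List.foldl, ruleStepA, depthStepB, this.1, this.2]
          · have := ih d s
            have hp' : ¬ ('(' = c) := fun h => hp h.symm
            simp [cleanB, hb, hq, List.foldl, ruleStepA, depthStepB, hp, hc, hp', this.1, this.2]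
termination_by cs => cs.length
decreasing_by all_goals first
  | (simp; omega)
  | (have := skipQ_length_le rest; simp; omega)
  | simp

-- ===== VERDICT (by name: the statement is the Claim_ definition above) =====
theorem rule_complete_spec : Claim_equal_rule_complete := by
  intro chunks _
  unfold Spec_rule_complete rule_complete rule_complete_alt
  have h := foldA_clean (PySem.Str.join "" chunks).toList 0 false
  simp only [h.1, h.2, Bool.false_or]
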